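-- pv_equiv track=rewrite | github.com/chen-yifu/NLP-EMR-Pipeline | pipeline/operative_pipeline/postprocessing/compare_excel.py | make_custom_id_dict
-- ===== SOURCE A (Python) =====
-- from typing import List, Dict
--
-- def make_custom_id_dict(id_col: str, id_col_dict: dict, old_dict: dict) -> Dict[str, dict]:
--     """
--     Makes an dictionary with the values in the id column as keys and the rest of the columns as the dictionary values.
--
--     | id| a | b |
--     |---|---|---|
--     | 1 | 3 | 5 |
--     | 4 | 4 | 4 |
--
--     becomes {"1":{"a":3, "b":5}, "4":{"a":4, "b":4}}
--
--     :param id_col: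
--     :param id_col_dict:
--     :param old_dict:
--     :return:
--     """
--     custom_id_dict = {}
--     for index, id_col_val in id_col_dict.items():
--         row = {}
--         for col, values in old_dict.items():
--             if col == id_col:
--                 continue
--             else:
--                 row[col] = values[index]
--         custom_id_dict[id_col_val] = row
--     return custom_id_dict
-- ===== SOURCE B (Python) =====
-- from typing import Dict
--
-- def make_custom_id_dict(id_col: str, id_col_dict: dict, old_dict: dict) -> Dict[str, dict]:
--     # Staged pipeline: materialize the non-id columns as an aligned matrix
--     # (one list of cells per column, in id order), then transpose it with
--     # positional indexing and zip the pieces back together into row dicts.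
--     indices = list(id_col_dict)
--     cols = [(col, values) for col, values in old_dict.items() if col != id_col]
--     names = [col for col, _ in cols]
--     matrix = [[values[i] for i in indices] for _, values in cols]
--     rows = [dict(zip(names, [column[j] for column in matrix])) for j in range(len(indices))]
--     return dict(zip(id_col_dict.values(), rows))
-- ===== Notes on version B (the rewrite author's own statement) =====
-- stated objective: alternative
-- what changed: B replaces A's fused nested dict-filling loops with a staged zip/transpose pipeline: it extracts the non-id columns as an aligned cell matrix, transposes it positionally into row tuples, builds each row dict with dict(zip(...)), and pairs rows with id values in one final dict(zip(...)); duplicate id values still resolve last-wins via the final dict construction.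
import Mathlib
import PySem

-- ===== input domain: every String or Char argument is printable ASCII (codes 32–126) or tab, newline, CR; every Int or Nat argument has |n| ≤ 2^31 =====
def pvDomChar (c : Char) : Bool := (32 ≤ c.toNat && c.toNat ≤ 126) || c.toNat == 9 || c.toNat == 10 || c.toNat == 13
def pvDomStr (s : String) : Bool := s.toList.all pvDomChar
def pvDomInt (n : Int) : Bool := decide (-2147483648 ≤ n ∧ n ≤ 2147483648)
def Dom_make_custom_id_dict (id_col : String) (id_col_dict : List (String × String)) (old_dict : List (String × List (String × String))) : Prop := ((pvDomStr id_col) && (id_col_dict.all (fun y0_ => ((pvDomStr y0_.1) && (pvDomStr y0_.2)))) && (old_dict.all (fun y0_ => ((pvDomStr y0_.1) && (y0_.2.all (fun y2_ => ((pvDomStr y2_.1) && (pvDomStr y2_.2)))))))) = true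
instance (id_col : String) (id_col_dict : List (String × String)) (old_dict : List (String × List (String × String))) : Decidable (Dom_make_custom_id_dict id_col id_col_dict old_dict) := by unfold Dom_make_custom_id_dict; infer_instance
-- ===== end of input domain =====

-- B replaces A's fused nested dict-filling loops with a staged zip/transpose pipeline
-- (aligned cell matrix, positional transpose, dict(zip(...)) per row); same cost ("alternative").


-- ===== PORT A =====
-- A: for each (index, id_val) of id_col_dict, gather the complete row over the non-id columns
-- (values[index]; Pre_ guarantees the key is present, so the getD default is never used),
-- then custom_id_dict[id_val] = row.  Dicts are PySem.Dict, converted to items lists at the end.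
def make_custom_id_dict (id_col : String) (id_col_dict : List (String × String)) (old_dict : List (String × List (String × String))) : List (String × List (String × String)) :=
  ((id_col_dict.foldl
      (fun (acc : PySem.Dict String (PySem.Dict String String)) (p : String × String) =>
        acc.insert p.2
          (old_dict.foldl
            (fun (row : PySem.Dict String String) (q : String × List (String × String)) =>
              if q.1 == id_col then row
              else row.insert q.1 ((PySem.Dict.ofList q.2).getD p.1 ""))
            PySem.Dict.empty))
      PySem.Dict.empty).items).map (fun e => (e.1, e.2.items))

-- ===== PORT B =====
-- B (from Source B): indices, the filtered column list, the aligned cell matrix, the positional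
-- transpose into per-row dicts via dict(zip(names, cells)), and the final dict(zip(ids, rows)).
def make_custom_id_dict_alt (id_col : String) (id_col_dict : List (String × String)) (old_dict : List (String × List (String × String))) : List (String × List (String × String)) :=
  let indices := id_col_dict.map (·.1)
  let cols := old_dict.filter (fun q => q.1 != id_col)
  let names := cols.map (·.1)
  let matrix := cols.map (fun q => indices.map (fun i => (PySem.Dict.ofList q.2).getD i ""))
  let rows := (List.range indices.length).map (fun j =>
      PySem.Dict.ofList (names.zip (matrix.map (fun column => column.getD j ""))))
  ((PySem.Dict.ofList ((id_col_dict.map (·.2)).zip rows)).items).map (fun e => (e.1, e.2.items))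

-- ===== PRECONDITION & SPEC =====
-- Pre_ excludes exactly the inputs on which Python A raises KeyError: some id index missing
-- from a non-id column's value dict (values[index]).
def Pre_make_custom_id_dict (id_col : String) (id_col_dict : List (String × String)) (old_dict : List (String × List (String × String))) : Prop :=
  ∀ q ∈ old_dict, q.1 ≠ id_col → ∀ p ∈ id_col_dict, (PySem.Dict.ofList q.2).contains p.1 = true
instance (id_col : String) (id_col_dict : List (String × String)) (old_dict : List (String × List (String × String))) : Decidable (Pre_make_custom_id_dict id_col id_col_dict old_dict) := by unfold Pre_make_custom_id_dict; infer_instance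

def pvWitness_make_custom_id_dict : String × (List (String × String)) × (List (String × List (String × String))) :=
  ("id", [("0", "r1"), ("1", "r2")], [("id", [("0", "r1"), ("1", "r2")]), ("a", [("0", "u"), ("1", "w")])])

def Spec_make_custom_id_dict (id_col : String) (id_col_dict : List (String × String)) (old_dict : List (String × List (String × String))) (out : List (String × List (String × String))) : Prop := out = make_custom_id_dict_alt id_col id_col_dict old_dict
instance (id_col : String) (id_col_dict : List (String × String)) (old_dict : List (String × List (String × String))) (out : List (String × List (String × String))) : Decidable (Spec_make_custom_id_dict id_col id_col_dict old_dict out) := by unfold Spec_make_custom_id_dict; infer_instance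

-- ===== CLAIM (what is proved, stated in full; the proofs are below) =====
def Claim_equal_make_custom_id_dict : Prop := ∀ (id_col : String) (id_col_dict : List (String × String)) (old_dict : List (String × List (String × String))), Dom_make_custom_id_dict id_col id_col_dict old_dict → Pre_make_custom_id_dict id_col id_col_dict old_dict → Spec_make_custom_id_dict id_col id_col_dict old_dict (make_custom_id_dict id_col id_col_dict old_dict)

-- ===== LEMMAS AND PROOFS =====

-- A's row for the id index i (the inner gather loop of port A)
def pvRowA (id_col : String) (old_dict : List (String × List (String × String))) (i : String) : PySem.Dict String String :=
  old_dict.foldl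
    (fun (row : PySem.Dict String String) (q : String × List (String × String)) =>
      if q.1 == id_col then row
      else row.insert q.1 ((PySem.Dict.ofList q.2).getD i ""))
    PySem.Dict.empty

-- dict(zip(names, cells at i)) over the filtered columns IS A's gathered row
lemma row_eq (id_col : String) (old_dict : List (String × List (String × String))) (i : String) :
    PySem.Dict.ofList ((old_dict.filter (fun q => q.1 != id_col)).map
        (fun q => (q.1, (PySem.Dict.ofList q.2).getD i "")))
      = pvRowA id_col old_dict i := by
  show ((old_dict.filter (fun q => q.1 != id_col)).map
        (fun q => (q.1, (PySem.Dict.ofList q.2).getD i ""))).foldl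
        (fun (d : PySem.Dict String String) p => d.insert p.1 p.2) PySem.Dict.empty
      = pvRowA id_col old_dict i
  rw [List.foldl_map, List.foldl_filter]
  unfold pvRowA
  congr 1
  funext row q
  by_cases h : q.1 = id_col
  · simp [h]
  · simp [h]

-- the zipped (id value, row) list of port B is the mapped list port A folds over
lemma zip_rows_eq (id_col : String) (id_col_dict : List (String × String)) (old_dict : List (String × List (String × String))) :
    (id_col_dict.map (·.2)).zip
      ((List.range (id_col_dict.map (·.1)).length).map (fun j =>
        PySem.Dict.ofList
          (((old_dict.filter (fun q => q.1 != id_col)).map (·.1)).zip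
            (((old_dict.filter (fun q => q.1 != id_col)).map
                (fun q => (id_col_dict.map (·.1)).map (fun i => (PySem.Dict.ofList q.2).getD i ""))).map
              (fun column => column.getD j "")))))
      = id_col_dict.map (fun p => (p.2, pvRowA id_col old_dict p.1)) := by
  apply List.ext_getElem
  · simp
  · intro k h1 h2
    simp only [List.getElem_zip, List.getElem_map, List.getElem_range]
    have hk : k < id_col_dict.length := by simpa using h2
    congr 1
    rw [← row_eq id_col old_dict (id_col_dict[k].1)]
    congr 1
    rw [List.map_map, List.zip_map']
    apply List.map_congr_left
    intro q _
    congr 1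
    show ((id_col_dict.map (·.1)).map (fun i => (PySem.Dict.ofList q.2).getD i "")).getD k "" = _
    rw [List.getD_eq_getElem _ _ (by simpa using hk)]
    simp

-- ===== VERDICT (by name: the statement is the Claim_ definition above) =====
theorem make_custom_id_dict_spec : Claim_equal_make_custom_id_dict := by
  intro id_col id_col_dict old_dict _ _
  show make_custom_id_dict id_col id_col_dict old_dict = make_custom_id_dict_alt id_col id_col_dict old_dict
  unfold make_custom_id_dict make_custom_id_dict_alt
  congr 1
  congr 1
  rw [zip_rows_eq id_col id_col_dict old_dict]
  show _ = (id_col_dict.map (fun p => (p.2, pvRowA id_col old_dict p.1))).foldl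
      (fun (d : PySem.Dict String (PySem.Dict String String)) p => d.insert p.1 p.2) PySem.Dict.empty
  rw [List.foldl_map]
  rfl
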